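-- pv_equiv track=rewrite | github.com/202425123/gaming-integrity-analytics | count.py | count_influenced_victims
-- ===== SOURCE A (Python) =====
-- def get_match_times(kills_data):
--     """Takes list of kills data
--     Calculates the start and end times of each match based on the first and last kill
--     Returns dictionary of match start and end times
--     """
--     match_times = {}
--     for match_id, killer_id, victim_id, time in kills_data:
--         if match_id not in match_times:
--             match_times[match_id] = {"start": time, "end": time}
--         else:
--             # Start time is the first kill in match
--             if time < match_times[match_id]["start"]:
--                 match_times[match_id]["start"] = time
--             # End time is the last kill in match
--             if time > match_times[match_id]["end"]:
--                 match_times[match_id]["end"] = time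
--     return match_times
--
-- def count_influenced_victims(cheaters_data, kills_data):
--     """Takes cheaters data and kills data
--     Estimates the number of victims influenced to be cheaters by other cheaters while accounting for dead players
--     Returns integer representing the number of influenced cheaters
--     """
--     cheaters_dict = {cheater_id: {"start_date": start_date, "ban_date": ban_date} for cheater_id, start_date, ban_date in cheaters_data}
--     match_times = get_match_times(kills_data)
--     influenced_cheaters = set()
--     dead_players_by_match = {}
--     for match_id, killer, victim, time in kills_data:
--         # Add dead players set for this match (if not already added)
--         if match_id not in dead_players_by_match:
--             dead_players_by_match[match_id] = set()
--         # Skip if the victim is already dead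
--         if victim in dead_players_by_match[match_id]:
--             continue
--         # Mark the victim as dead
--         dead_players_by_match[match_id].add(victim)
--         # Check if the killer is an active cheater at the match start time
--         match_start = match_times[match_id]["start"]
--         if killer in cheaters_dict:
--             cheat_start_date = cheaters_dict[killer]["start_date"]
--             if cheat_start_date <= match_start:
--                 # Check if the victim starts cheating after the match
--                 if victim in cheaters_dict:
--                     victim_cheat_start = cheaters_dict[victim]["start_date"]
--                     if victim_cheat_start >= match_start:
--                         influenced_cheaters.add(victim)
--     return len(influenced_cheaters)
-- ===== SOURCE B (Python) =====
-- def count_influenced_victims(cheaters_data, kills_data):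
--     """Victim-centric decomposition: instead of one global stateful sweep, decide
--     for each distinct cheater independently (by a direct scan with early return)
--     whether some first kill of them was made by a cheater already active at the
--     match start, and count the cheaters for which that holds."""
--     start = {cheater_id: start_date for cheater_id, start_date, _ban in cheaters_data}
--
--     def match_start(match_id):
--         return min(time for m, _k, _v, time in kills_data if m == match_id)
--
--     def influenced(victim):
--         seen_matches = set()
--         for match_id, killer, v, _time in kills_data:
--             if v == victim and match_id not in seen_matches:
--                 seen_matches.add(match_id)
--                 ms = match_start(match_id)
--                 if killer in start and start[killer] <= ms and start[victim] >= ms: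
--                     return True
--         return False
--
--     return sum(1 for cheater in start if influenced(cheater))
-- ===== Notes on version B (the rewrite author's own statement) =====
-- stated objective: alternative
-- what changed: Replaces A's single global stateful sweep (per-match dead-player sets and an influenced set accumulated while scanning kills) by a victim-centric decomposition: iterate over the distinct cheaters and decide each one independently with a direct early-return scan of the kill list (match start recomputed on demand by min over the match's kills), counting the cheaters for which the scan succeeds.
import Mathlib
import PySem

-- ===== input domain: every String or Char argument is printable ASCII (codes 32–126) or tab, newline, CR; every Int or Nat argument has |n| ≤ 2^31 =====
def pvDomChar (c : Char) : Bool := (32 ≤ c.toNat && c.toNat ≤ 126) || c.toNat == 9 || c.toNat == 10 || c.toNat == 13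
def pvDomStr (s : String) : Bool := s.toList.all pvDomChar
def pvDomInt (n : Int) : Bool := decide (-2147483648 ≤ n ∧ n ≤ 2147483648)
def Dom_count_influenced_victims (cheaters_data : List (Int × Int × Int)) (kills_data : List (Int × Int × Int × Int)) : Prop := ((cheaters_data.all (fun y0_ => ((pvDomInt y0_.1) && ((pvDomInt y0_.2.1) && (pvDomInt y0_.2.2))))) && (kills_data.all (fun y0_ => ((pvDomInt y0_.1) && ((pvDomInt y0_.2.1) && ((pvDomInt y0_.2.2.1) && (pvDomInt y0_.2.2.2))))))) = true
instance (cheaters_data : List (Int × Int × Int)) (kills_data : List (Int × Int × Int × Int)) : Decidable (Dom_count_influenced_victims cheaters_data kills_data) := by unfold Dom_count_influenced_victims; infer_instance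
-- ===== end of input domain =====

-- B replaces A's single global stateful sweep by a victim-centric decomposition: for each
-- distinct cheater, an independent early-return scan of the kill list decides whether they
-- were influenced, and the successes are counted (objective: alternative).


-- ===== PORT A =====
-- Python's inner {"start": …, "end": …} dict (fixed string keys) is represented as the pair (start, end).
def get_match_times (kills_data : List (Int × Int × Int × Int)) : PySem.Dict Int (Int × Int) :=
  kills_data.foldl
    (fun mt kl =>
      match kl with
      | (m, _, _, t) =>
        if mt.contains m = false then mt.insert m (t, t)
        else
          let cur := mt.getD m (0, 0)
          let cur := if t < cur.1 then (t, cur.2) else cur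
          let cur := if t > cur.2 then (cur.1, t) else cur
          mt.insert m cur)
    PySem.Dict.empty

def pvCheatersA (cheaters_data : List (Int × Int × Int)) : PySem.Dict Int (Int × Int) :=
  cheaters_data.foldl (fun d c => d.insert c.1 (c.2.1, c.2.2)) PySem.Dict.empty

-- one iteration of A's main loop; match_times[match_id] always has the key (match_id comes
-- from the same kills list), so the getD default (0, 0) is unreachable
def pvStepA (cd : PySem.Dict Int (Int × Int)) (mt : PySem.Dict Int (Int × Int))
    (st : PySem.Set Int × PySem.Dict Int (PySem.Set Int)) (kl : Int × Int × Int × Int) :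
    PySem.Set Int × PySem.Dict Int (PySem.Set Int) :=
  match kl with
  | (m, killer, victim, _t) =>
    let dead := if st.2.contains m then st.2 else st.2.insert m PySem.Set.empty
    if (dead.getD m PySem.Set.empty).contains victim then (st.1, dead)
    else
      let dead := dead.insert m ((dead.getD m PySem.Set.empty).add victim)
      let ms := (mt.getD m (0, 0)).1
      match cd.get? killer with
      | none => (st.1, dead)
      | some p =>
        if p.1 ≤ ms then
          match cd.get? victim with
          | none => (st.1, dead)
          | some q => if q.1 ≥ ms then ((st.1).add victim, dead) else (st.1, dead)
        else (st.1, dead)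

def count_influenced_victims (cheaters_data : List (Int × Int × Int)) (kills_data : List (Int × Int × Int × Int)) : Int :=
  let cd := pvCheatersA cheaters_data
  let mt := get_match_times kills_data
  (kills_data.foldl (pvStepA cd mt) (PySem.Set.empty, PySem.Dict.empty)).1.len

-- ===== PORT B =====
def pvStartB (cheaters_data : List (Int × Int × Int)) : PySem.Dict Int Int :=
  cheaters_data.foldl (fun d c => d.insert c.1 c.2.1) PySem.Dict.empty

-- min(time for m, _k, _v, time in kills_data if m == match_id); the generator is nonempty at
-- every call site (match_id comes from kills_data), so min? is some and the getD 0 is unreachable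
def pvMatchStartOf (kills_data : List (Int × Int × Int × Int)) (match_id : Int) : Int :=
  (PySem.List.min? ((kills_data.filter (fun kl => kl.1 == match_id)).map (fun kl => kl.2.2.2)) (fun t => t)).getD 0

-- the inner 'for … in kills_data' loop of influenced(victim), with its early 'return True'
def pvInfluenced (start : PySem.Dict Int Int) (kills_data : List (Int × Int × Int × Int))
    (victim : Int) : List (Int × Int × Int × Int) → PySem.Set Int → Bool
  | [], _ => false
  | (match_id, killer, v, _t) :: rest, seen =>
    if v == victim && !(seen.contains match_id) then
      let ms := pvMatchStartOf kills_data match_id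
      if start.contains killer && decide (start.getD killer 0 ≤ ms) && decide (start.getD victim 0 ≥ ms)
      then true
      else pvInfluenced start kills_data victim rest (seen.add match_id)
    else pvInfluenced start kills_data victim rest seen

def count_influenced_victims_alt (cheaters_data : List (Int × Int × Int)) (kills_data : List (Int × Int × Int × Int)) : Int :=
  let start := pvStartB cheaters_data
  start.keys.foldl
    (fun acc c => if pvInfluenced start kills_data c kills_data PySem.Set.empty then acc + 1 else acc) 0

-- ===== PRECONDITION & SPEC =====
def Spec_count_influenced_victims (cheaters_data : List (Int × Int × Int)) (kills_data : List (Int × Int × Int × Int)) (out : Int) : Prop := out = count_influenced_victims_alt cheaters_data kills_data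
instance (cheaters_data : List (Int × Int × Int)) (kills_data : List (Int × Int × Int × Int)) (out : Int) : Decidable (Spec_count_influenced_victims cheaters_data kills_data out) := by unfold Spec_count_influenced_victims; infer_instance

-- ===== CLAIM (what is proved, stated in full; the proofs are below) =====
def Claim_equal_count_influenced_victims : Prop := ∀ (cheaters_data : List (Int × Int × Int)) (kills_data : List (Int × Int × Int × Int)), Dom_count_influenced_victims cheaters_data kills_data → Spec_count_influenced_victims cheaters_data kills_data (count_influenced_victims cheaters_data kills_data)

-- ===== LEMMAS AND PROOFS =====

-- proof-side helper: the sublist of kills whose (match, victim) pair is new, as (key, killer) items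
def pvFirstKills (fd : PySem.Dict (Int × Int) Int) : List (Int × Int × Int × Int) → List ((Int × Int) × Int)
  | [] => []
  | (m, killer, victim, _) :: rest =>
    if fd.contains (m, victim) then pvFirstKills fd rest
    else ((m, victim), killer) :: pvFirstKills (fd.insert (m, victim) killer) rest

-- A's influence test at one first kill, written over A's dicts
def pvCondA (cd : PySem.Dict Int (Int × Int)) (mt : PySem.Dict Int (Int × Int)) (m k v : Int) : Bool :=
  match cd.get? k with
  | none => false
  | some p =>
    if p.1 ≤ (mt.getD m (0, 0)).1 then
      match cd.get? v with
      | none => false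
      | some q => decide (q.1 ≥ (mt.getD m (0, 0)).1)
    else false

-- B's influence test at one first kill, written over B's dict and on-demand match start
def pvCondB (cs : PySem.Dict Int Int) (kills : List (Int × Int × Int × Int)) (m k v : Int) : Bool :=
  cs.contains k && decide (cs.getD k 0 ≤ pvMatchStartOf kills m)
    && decide (cs.getD v 0 ≥ pvMatchStartOf kills m)

-- the times of all kills of one match, in list order
def pvTimes (m : Int) (kills : List (Int × Int × Int × Int)) : List Int :=
  (kills.filter (fun kl => kl.1 == m)).map (fun kl => kl.2.2.2)

theorem pv_set_contains_add (s : PySem.Set Int) (x y : Int) :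
    (PySem.Set.add s x).contains y = (y == x || s.contains y) := by
  rw [Bool.eq_iff_iff]
  simp [PySem.Set.mem_add]
  tauto

theorem pv_cheaters_rel (cheaters : List (Int × Int × Int)) :
    ∀ x, (pvStartB cheaters).get? x = ((pvCheatersA cheaters).get? x).map Prod.fst := by
  unfold pvStartB pvCheatersA
  suffices h : ∀ (cs : List (Int × Int × Int)) (d1 : PySem.Dict Int (Int × Int)) (d2 : PySem.Dict Int Int),
      (∀ x, d2.get? x = (d1.get? x).map Prod.fst) →
      ∀ x, (cs.foldl (fun d c => d.insert c.1 c.2.1) d2).get? x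
        = ((cs.foldl (fun d c => d.insert c.1 (c.2.1, c.2.2)) d1).get? x).map Prod.fst by
    exact h cheaters _ _ (by intro x; simp [PySem.Dict.get?_empty])
  intro cs
  induction cs with
  | nil => intro d1 d2 h x; exact h x
  | cons c rest ih =>
    intro d1 d2 h x
    simp only [List.foldl_cons]
    apply ih
    intro y
    rw [PySem.Dict.get?_insert, PySem.Dict.get?_insert]
    split_ifs with he
    · simp
    · exact h y

-- the first component of A's match_times entry is the running fold of min over the match's times
theorem pv_mt_fold (kills : List (Int × Int × Int × Int)) :
    ∀ (d : PySem.Dict Int (Int × Int)) (m : Int),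
      ((kills.foldl
        (fun mt kl => match kl with
          | (m, _, _, t) =>
            if mt.contains m = false then mt.insert m (t, t)
            else
              let cur := mt.getD m (0, 0)
              let cur := if t < cur.1 then (t, cur.2) else cur
              let cur := if t > cur.2 then (cur.1, t) else cur
              mt.insert m cur) d).get? m).map Prod.fst
        = (pvTimes m kills).foldl (fun o t => some (o.elim t (fun s => min s t)))
            ((d.get? m).map Prod.fst) := by
  induction kills with
  | nil => intro d m; rfl
  | cons kl rest ih =>
    intro d m
    obtain ⟨m0, k, v, t⟩ := kl
    rw [List.foldl_cons]
    by_cases he : m0 = m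
    · subst he
      have htimes : pvTimes m0 ((m0, k, v, t) :: rest) = t :: pvTimes m0 rest := by
        simp [pvTimes]
      rw [htimes, List.foldl_cons, ih]
      congr 1
      by_cases hc : d.contains m0 = true
      · have h1 : ∃ p, d.get? m0 = some p := by
          have := PySem.Dict.contains_eq_isSome_get? d m0
          rw [hc] at this
          cases hv : d.get? m0
          · rw [hv] at this; simp at this
          · exact ⟨_, rfl⟩
        obtain ⟨⟨st, en⟩, hp⟩ := h1
        have hg : d.getD m0 (0, 0) = (st, en) := PySem.Dict.getD_of_get?_eq_some _ _ hp
        simp only [hc, hg, hp, Bool.true_eq_false, if_false]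
        rw [PySem.Dict.get?_insert, if_pos rfl]
        simp only [Option.map_some, Option.elim_some]
        split_ifs <;> simp <;> omega
      · have hc1 : d.contains m0 = false := by simpa using hc
        have hn : d.get? m0 = none := by
          have := PySem.Dict.contains_eq_isSome_get? d m0
          rw [hc1] at this
          cases hv : d.get? m0
          · rfl
          · rw [hv] at this; simp at this
        simp only [hc1, hn, if_true]
        rw [PySem.Dict.get?_insert, if_pos rfl]
        rfl
    · have htimes : pvTimes m ((m0, k, v, t) :: rest) = pvTimes m rest := by
        simp [pvTimes, he]
      rw [htimes, ih]
      congr 2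
      by_cases hc : d.contains m0 = true
      · simp only [hc, Bool.true_eq_false, if_false]
        rw [PySem.Dict.get?_insert, if_neg (fun h => he h.symm)]
      · have hc1 : d.contains m0 = false := by simpa using hc
        simp only [hc1, if_true]
        rw [PySem.Dict.get?_insert, if_neg (fun h => he h.symm)]

theorem pv_foldl_min_some (ts : List Int) :
    ∀ s : Int, ts.foldl (fun o t => some (o.elim t (fun s => min s t))) (some s)
      = some (ts.foldl min s) := by
  induction ts with
  | nil => intro s; rfl
  | cons t rest ih => intro s; simp only [List.foldl_cons, Option.elim]; exact ih _

theorem pv_mt_fold' (kills : List (Int × Int × Int × Int)) (m : Int) :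
    ((get_match_times kills).get? m).map Prod.fst
      = (pvTimes m kills).foldl (fun o t => some (o.elim t (fun s => min s t))) none := by
  have h := pv_mt_fold kills PySem.Dict.empty m
  rw [PySem.Dict.get?_empty] at h
  exact h

-- for a match id occurring in kills, A's stored start equals B's on-demand min
theorem pv_ms_eq (kills : List (Int × Int × Int × Int)) (m : Int)
    (hne : pvTimes m kills ≠ []) :
    ((get_match_times kills).getD m (0, 0)).1 = pvMatchStartOf kills m := by
  obtain ⟨t, ts, hts⟩ := List.exists_cons_of_ne_nil hne
  have h1 := pv_mt_fold' kills m
  rw [hts, List.foldl_cons] at h1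
  simp only [Option.elim_none] at h1
  rw [pv_foldl_min_some] at h1
  have hts' : (kills.filter (fun kl => kl.1 == m)).map (fun kl => kl.2.2.2) = t :: ts := hts
  have h2 : pvMatchStartOf kills m = ts.foldl min t := by
    unfold pvMatchStartOf
    rw [hts', PySem.List.min?_id_cons]
    rfl
  rw [PySem.Dict.getD_eq_get?_getD, h2]
  cases hget : (get_match_times kills).get? m with
  | none => rw [hget] at h1; simp at h1
  | some p =>
    rw [hget] at h1
    simp only [Option.map_some, Option.some.injEq] at h1
    simpa using h1

-- every first kill's match id occurs in kills
theorem pv_fk_match_mem :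
    ∀ (kills : List (Int × Int × Int × Int)) (fd : PySem.Dict (Int × Int) Int)
      (e : (Int × Int) × Int), e ∈ pvFirstKills fd kills → ∃ kl ∈ kills, kl.1 = e.1.1 := by
  intro kills
  induction kills with
  | nil => intro fd e h; simp [pvFirstKills] at h
  | cons kl rest ih =>
    intro fd e h
    obtain ⟨m, k, v, t⟩ := kl
    simp only [pvFirstKills] at h
    split_ifs at h with hc
    · obtain ⟨kl', hmem, h1⟩ := ih fd e h
      exact ⟨kl', List.mem_cons_of_mem _ hmem, h1⟩
    · rcases List.mem_cons.mp h with h1 | h1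
      · subst h1; exact ⟨(m, k, v, t), List.mem_cons_self, rfl⟩
      · obtain ⟨kl', hmem, h2⟩ := ih _ e h1
        exact ⟨kl', List.mem_cons_of_mem _ hmem, h2⟩

theorem pv_times_ne_nil_of_mem (kills : List (Int × Int × Int × Int))
    (kl : Int × Int × Int × Int) (h : kl ∈ kills) : pvTimes kl.1 kills ≠ [] := by
  simp only [pvTimes, ne_eq, List.map_eq_nil_iff, List.filter_eq_nil_iff]
  intro hall
  exact absurd (beq_self_eq_true kl.1) (by simpa using hall kl h)

-- the two per-kill tests agree (given the dict relation and an occurring match id);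
-- A's additionally records that the victim is a cheater key
theorem pv_cond_iff (cd : PySem.Dict Int (Int × Int)) (cs : PySem.Dict Int Int)
    (kills : List (Int × Int × Int × Int))
    (hc : ∀ x, cs.get? x = (cd.get? x).map Prod.fst) (m k v : Int)
    (hms : ((get_match_times kills).getD m (0, 0)).1 = pvMatchStartOf kills m) :
    pvCondA cd (get_match_times kills) m k v = true
      ↔ pvCondB cs kills m k v = true ∧ cd.contains v = true := by
  unfold pvCondA pvCondB
  rw [hms]
  cases hk : cd.get? k with
  | none =>
    have : cs.contains k = false := by
      rw [PySem.Dict.contains_eq_isSome_get?, hc, hk]; rfl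
    simp [this]
  | some p =>
    have hk2 : cs.get? k = some p.1 := by rw [hc, hk]; rfl
    have hck : cs.contains k = true := by
      rw [PySem.Dict.contains_eq_isSome_get?, hk2]; rfl
    have hgk : cs.getD k 0 = p.1 := PySem.Dict.getD_of_get?_eq_some _ _ hk2
    cases hv : cd.get? v with
    | none =>
      have hcv : cd.contains v = false := by
        rw [PySem.Dict.contains_eq_isSome_get?, hv]; rfl
      simp only [hcv]
      split_ifs <;> simp
    | some q =>
      have hv2 : cs.get? v = some q.1 := by rw [hc, hv]; rfl
      have hgv : cs.getD v 0 = q.1 := PySem.Dict.getD_of_get?_eq_some _ _ hv2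
      have hcv : cd.contains v = true := by
        rw [PySem.Dict.contains_eq_isSome_get?, hv]; rfl
      simp only [hck, hgk, hgv, hcv, Bool.true_and, and_true]
      by_cases h1 : p.1 ≤ pvMatchStartOf kills m <;>
        by_cases h2 : q.1 ≥ pvMatchStartOf kills m <;> simp [h1, h2]

-- A's loop over kills equals the condA-filtered accumulation over the first kills
theorem pv_loop_eq (cd : PySem.Dict Int (Int × Int)) (mt : PySem.Dict Int (Int × Int)) :
    ∀ (kills : List (Int × Int × Int × Int)) (s : PySem.Set Int)
      (dd : PySem.Dict Int (PySem.Set Int)) (fd : PySem.Dict (Int × Int) Int),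
      (∀ m v, (dd.getD m PySem.Set.empty).contains v = fd.contains (m, v)) →
      (kills.foldl (pvStepA cd mt) (s, dd)).1
        = (pvFirstKills fd kills).foldl
            (fun s e => if pvCondA cd mt e.1.1 e.2 e.1.2 then PySem.Set.add s e.1.2 else s) s := by
  intro kills
  induction kills with
  | nil => intro s dd fd _; rfl
  | cons kl rest ih =>
    intro s dd fd hinv
    obtain ⟨m, killer, victim, t⟩ := kl
    simp only [List.foldl_cons, pvFirstKills]
    by_cases hfd : fd.contains (m, victim) = true
    · have hdead : (dd.getD m PySem.Set.empty).contains victim = true := by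
        rw [hinv]; exact hfd
      have hcm : dd.contains m = true := by
        by_contra hn
        rw [PySem.Dict.getD_of_not_contains _ _ (by simpa using hn)] at hdead
        simp [PySem.Set.empty] at hdead
      have hstep : pvStepA cd mt (s, dd) (m, killer, victim, t) = (s, dd) := by
        unfold pvStepA
        simp only [hcm, hdead, reduceIte]
      rw [hstep, if_pos hfd]
      exact ih s dd fd hinv
    · have hfd' : fd.contains (m, victim) = false := by simpa using hfd
      have hdead : (dd.getD m PySem.Set.empty).contains victim = false := by
        rw [hinv]; exact hfd'
      rw [if_neg (by simp [hfd'])]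
      set dead0 : PySem.Dict Int (PySem.Set Int) :=
        if dd.contains m then dd else dd.insert m PySem.Set.empty with hdead0
      have hg0 : ∀ m', dead0.getD m' PySem.Set.empty = dd.getD m' PySem.Set.empty := by
        intro m'
        rw [hdead0]
        split_ifs with hcm
        · rfl
        · rw [PySem.Dict.getD_insert]
          split_ifs with he
          · subst he
            rw [PySem.Dict.getD_of_not_contains _ _ (by simpa using hcm)]
          · rfl
      have hstep : pvStepA cd mt (s, dd) (m, killer, victim, t)
          = ((if pvCondA cd mt m killer victim then PySem.Set.add s victim else s),
             dead0.insert m ((dd.getD m PySem.Set.empty).add victim)) := by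
        unfold pvStepA pvCondA
        simp only [← hdead0, hg0, hdead]
        cases cd.get? killer with
        | none => rfl
        | some p =>
          by_cases h1 : p.1 ≤ (mt.getD m (0, 0)).1
          · simp only [if_pos h1]
            cases cd.get? victim with
            | none => rfl
            | some q =>
              by_cases h2 : q.1 ≥ (mt.getD m (0, 0)).1
              · simp [h2]
              · simp [h2]
          · simp [h1]
      rw [hstep]
      simp only [List.foldl_cons]
      apply ih
      intro m' v'
      rw [PySem.Dict.contains_insert, PySem.Dict.getD_insert]
      split_ifs with he
      · subst he
        rw [pv_set_contains_add, hinv]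
        congr 1
        rw [Bool.eq_iff_iff]
        simp
      · rw [hg0, hinv]
        have : ((m', v') == (m, victim)) = false := by
          simp [Prod.ext_iff]
          intro h; exact absurd h he
        rw [this, Bool.false_or]

-- membership in the condA accumulation
theorem pv_mem_foldl (cd : PySem.Dict Int (Int × Int)) (mt : PySem.Dict Int (Int × Int)) :
    ∀ (L : List ((Int × Int) × Int)) (s : PySem.Set Int) (x : Int),
      (x ∈ L.foldl
          (fun s e => if pvCondA cd mt e.1.1 e.2 e.1.2 then PySem.Set.add s e.1.2 else s) s)
        ↔ x ∈ s ∨ ∃ e ∈ L, e.1.2 = x ∧ pvCondA cd mt e.1.1 e.2 e.1.2 = true := by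
  intro L
  induction L with
  | nil => intro s x; simp
  | cons e rest ih =>
    intro s x
    simp only [List.foldl_cons]
    by_cases hc : pvCondA cd mt e.1.1 e.2 e.1.2 = true
    · rw [if_pos hc, ih]
      rw [PySem.Set.mem_add]
      constructor
      · rintro ((h | h) | h)
        · exact Or.inl h
        · exact Or.inr ⟨e, List.mem_cons_self, h.symm, hc⟩
        · obtain ⟨e', he', hx, hce'⟩ := h
          exact Or.inr ⟨e', List.mem_cons_of_mem _ he', hx, hce'⟩
      · rintro (h | ⟨e', he', hx, hce'⟩)
        · exact Or.inl (Or.inl h)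
        · rcases List.mem_cons.mp he' with h1 | h1
          · subst h1; exact Or.inl (Or.inr hx.symm)
          · exact Or.inr ⟨e', h1, hx, hce'⟩
    · rw [if_neg hc, ih]
      constructor
      · rintro (h | ⟨e', he', hx, hce'⟩)
        · exact Or.inl h
        · exact Or.inr ⟨e', List.mem_cons_of_mem _ he', hx, hce'⟩
      · rintro (h | ⟨e', he', hx, hce'⟩)
        · exact Or.inl h
        · rcases List.mem_cons.mp he' with h1 | h1
          · subst h1; exact absurd hce' hc
          · exact Or.inr ⟨e', h1, hx, hce'⟩

theorem pv_nodup_foldl (cd : PySem.Dict Int (Int × Int)) (mt : PySem.Dict Int (Int × Int)) :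
    ∀ (L : List ((Int × Int) × Int)) (s : PySem.Set Int), s.Nodup →
      (L.foldl
        (fun s e => if pvCondA cd mt e.1.1 e.2 e.1.2 then PySem.Set.add s e.1.2 else s) s).Nodup := by
  intro L
  induction L with
  | nil => intro s h; exact h
  | cons e rest ih =>
    intro s h
    simp only [List.foldl_cons]
    split_ifs
    · exact ih _ (PySem.Set.nodup_add _ _ h)
    · exact ih _ h

-- B's early-return scan finds exactly the first-kill entries of this victim passing condB
theorem pv_influenced_iff (start : PySem.Dict Int Int) (kills : List (Int × Int × Int × Int))
    (victim : Int) :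
    ∀ (rest : List (Int × Int × Int × Int)) (seen : PySem.Set Int)
      (fd : PySem.Dict (Int × Int) Int),
      (∀ m, seen.contains m = fd.contains (m, victim)) →
      (pvInfluenced start kills victim rest seen = true
        ↔ ∃ e ∈ pvFirstKills fd rest, e.1.2 = victim ∧ pvCondB start kills e.1.1 e.2 victim = true) := by
  intro rest
  induction rest with
  | nil => intro seen fd _; simp [pvInfluenced, pvFirstKills]
  | cons kl rest ih =>
    intro seen fd hinv
    obtain ⟨m, k, v, t⟩ := kl
    simp only [pvInfluenced, pvFirstKills]
    by_cases hv : v = victim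
    · subst hv
      by_cases hs : seen.contains m = true
      · have hfd : fd.contains (m, v) = true := by rw [← hinv]; exact hs
        rw [if_pos hfd]
        have hm : m ∈ seen := by simpa using hs
        rw [if_neg (by simp [hm])]
        exact ih seen fd hinv
      · have hs' : seen.contains m = false := by simpa using hs
        have hfd : fd.contains (m, v) = false := by rw [← hinv]; exact hs'
        have hm : m ∉ seen := by simpa using hs'
        rw [if_pos (by simp [hm])]
        rw [if_neg (show ¬(fd.contains (m, v) = true) by simp [hfd])]
        have hinv' : ∀ m', (seen.add m).contains m' = (fd.insert (m, v) k).contains (m', v) := by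
          intro m'
          rw [pv_set_contains_add, PySem.Dict.contains_insert, hinv]
          congr 1
          rw [Bool.eq_iff_iff]
          simp [Prod.ext_iff]
        by_cases hcond : (start.contains k && decide (start.getD k 0 ≤ pvMatchStartOf kills m)
            && decide (start.getD v 0 ≥ pvMatchStartOf kills m)) = true
        · simp only [hcond, if_true]
          constructor
          · intro _
            exact ⟨((m, v), k), List.mem_cons_self, rfl, hcond⟩
          · intro _; trivial
        · simp only [hcond, Bool.false_eq_true, if_false]
          rw [ih (seen.add m) _ hinv']
          constructor
          · rintro ⟨e, he, hx, hce⟩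
            exact ⟨e, List.mem_cons_of_mem _ he, hx, hce⟩
          · rintro ⟨e, he, hx, hce⟩
            rcases List.mem_cons.mp he with h1 | h1
            · subst h1; exact absurd hce (by simpa [pvCondB] using hcond)
            · exact ⟨e, h1, hx, hce⟩
    · rw [if_neg (by simp [hv])]
      by_cases hfd : fd.contains (m, v) = true
      · rw [if_pos hfd]
        exact ih seen fd hinv
      · rw [if_neg hfd]
        have hinv' : ∀ m', seen.contains m' = (fd.insert (m, v) k).contains (m', victim) := by
          intro m'
          rw [PySem.Dict.contains_insert, hinv]
          have : ((m', victim) == (m, v)) = false := by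
            simp [Prod.ext_iff]
            intro _ h
            exact hv h.symm
          rw [this, Bool.false_or]
        rw [ih seen _ hinv']
        constructor
        · rintro ⟨e, he, hx, hce⟩
          exact ⟨e, List.mem_cons_of_mem _ he, hx, hce⟩
        · rintro ⟨e, he, hx, hce⟩
          rcases List.mem_cons.mp he with h1 | h1
          · subst h1; simp at hx; omega
          · exact ⟨e, h1, hx, hce⟩

theorem pv_main (cheaters_data : List (Int × Int × Int)) (kills_data : List (Int × Int × Int × Int)) :
    count_influenced_victims cheaters_data kills_data
      = count_influenced_victims_alt cheaters_data kills_data := by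
  unfold count_influenced_victims count_influenced_victims_alt
  simp only []
  set cd := pvCheatersA cheaters_data with hcd
  set cs := pvStartB cheaters_data with hcs
  set mt := get_match_times kills_data with hmt
  have hc := pv_cheaters_rel cheaters_data
  have hccont : ∀ x, cs.contains x = cd.contains x := by
    intro x
    rw [PySem.Dict.contains_eq_isSome_get?, PySem.Dict.contains_eq_isSome_get?, hc]
    cases cd.get? x <;> rfl
  -- the condA/condB bridge for every first-kill entry
  have hcond : ∀ e ∈ pvFirstKills PySem.Dict.empty kills_data,
      (pvCondA cd mt e.1.1 e.2 e.1.2 = true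
        ↔ pvCondB cs kills_data e.1.1 e.2 e.1.2 = true ∧ cd.contains e.1.2 = true) := by
    intro e he
    obtain ⟨kl, hmem, hm⟩ := pv_fk_match_mem kills_data PySem.Dict.empty e he
    have hne : pvTimes e.1.1 kills_data ≠ [] := by
      rw [← hm]; exact pv_times_ne_nil_of_mem kills_data kl hmem
    exact pv_cond_iff cd cs kills_data hc e.1.1 e.2 e.1.2 (pv_ms_eq kills_data e.1.1 hne)
  -- A's set
  have hA := pv_loop_eq cd mt kills_data PySem.Set.empty PySem.Dict.empty PySem.Dict.empty
    (by intro m v; simp [PySem.Dict.getD_empty, PySem.Dict.contains_empty, PySem.Set.empty])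
  rw [hA]
  set S := (pvFirstKills PySem.Dict.empty kills_data).foldl
    (fun s e => if pvCondA cd mt e.1.1 e.2 e.1.2 then PySem.Set.add s e.1.2 else s)
    PySem.Set.empty with hS
  -- B's count is a countP over the distinct cheater keys
  have hB : cs.keys.foldl
      (fun acc c => if pvInfluenced cs kills_data c kills_data PySem.Set.empty then acc + 1 else acc) 0
      = (cs.keys.countP (fun c => pvInfluenced cs kills_data c kills_data PySem.Set.empty) : Int) := by
    rw [PySem.List.foldl_if_add_one]
    simp
  rw [hB]
  -- membership in S ↔ key with influenced
  have hmemS : ∀ x, x ∈ S ↔ x ∈ cs.keys ∧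
      pvInfluenced cs kills_data x kills_data PySem.Set.empty = true := by
    intro x
    rw [hS, pv_mem_foldl]
    have hinf := pv_influenced_iff cs kills_data x kills_data PySem.Set.empty PySem.Dict.empty
      (by intro m; simp [PySem.Dict.contains_empty, PySem.Set.empty])
    rw [hinf]
    have hkey : x ∈ cs.keys ↔ cd.contains x = true := by
      rw [← PySem.Dict.contains_iff_mem_keys, hccont]
    constructor
    · rintro (h | ⟨e, he, hx, hce⟩)
      · simp [PySem.Set.empty] at h
      · have := (hcond e he).mp hce
        subst hx
        exact ⟨hkey.mpr this.2, ⟨e, he, rfl, this.1⟩⟩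
    · rintro ⟨hxk, e, he, hx, hce⟩
      refine Or.inr ⟨e, he, hx, (hcond e he).mpr ⟨?_, ?_⟩⟩
      · rw [hx]; exact hce
      · rw [hx]; exact hkey.mp hxk
  -- both sides count the same nodup list
  have hSnodup : S.Nodup := pv_nodup_foldl cd mt _ _ (by simp [PySem.Set.empty])
  have hkeysnodup : cs.keys.Nodup := by
    rw [hcs]
    unfold pvStartB
    exact PySem.Dict.nodup_keys_foldl_insert_key cheaters_data (fun c => c.1)
      (fun d c => c.2.1) PySem.Dict.empty PySem.Dict.nodup_keys_empty
  have hperm : S.Perm (cs.keys.filter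
      (fun c => pvInfluenced cs kills_data c kills_data PySem.Set.empty)) := by
    rw [List.perm_ext_iff_of_nodup hSnodup (List.Nodup.filter _ hkeysnodup)]
    intro x
    rw [hmemS, List.mem_filter]
  rw [List.countP_eq_length_filter]
  have : PySem.Set.len S = (S.length : Int) := rfl
  rw [this, hperm.length_eq]

-- ===== VERDICT (by name: the statement is the Claim_ definition above) =====
theorem count_influenced_victims_spec : Claim_equal_count_influenced_victims := by
  intro cheaters_data kills_data _
  unfold Spec_count_influenced_victims
  exact pv_main cheaters_data kills_data
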